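-- pv_equiv track=rewrite | github.com/niconico25/comparison_of_python_code | 9_2_divisor.py | divisorize_syntax
-- ===== SOURCE A (Python) =====
-- def divisorize_syntax(fct):
--     div = []
--     if not fct:
--         div.append([])
--         return div
--     b, e = fct.pop()  # base, exponent
--     pre_div = divisorize_syntax(fct)
--     suf_div = [[(b, k)] for k in range(e + 1)]
--     for pre in pre_div:
--         for suf in suf_div:
--             div.append(pre + suf)
--     return div
-- ===== SOURCE B (Python) =====
-- def divisorize_syntax(fct):
--     div = [[]]
--     while fct:
--         b, e = fct.pop(0)
--         div = [d + [(b, k)] for d in div for k in range(e + 1)]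
--     return div
-- ===== Notes on version B (the rewrite author's own statement) =====
-- stated objective: simpler
-- what changed: Replaces A's recursion popping from the back (with an explicit double append loop) by an iterative front-to-back product build: div starts as the single empty divisor and is extended with one comprehension per factor.
import Mathlib
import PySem

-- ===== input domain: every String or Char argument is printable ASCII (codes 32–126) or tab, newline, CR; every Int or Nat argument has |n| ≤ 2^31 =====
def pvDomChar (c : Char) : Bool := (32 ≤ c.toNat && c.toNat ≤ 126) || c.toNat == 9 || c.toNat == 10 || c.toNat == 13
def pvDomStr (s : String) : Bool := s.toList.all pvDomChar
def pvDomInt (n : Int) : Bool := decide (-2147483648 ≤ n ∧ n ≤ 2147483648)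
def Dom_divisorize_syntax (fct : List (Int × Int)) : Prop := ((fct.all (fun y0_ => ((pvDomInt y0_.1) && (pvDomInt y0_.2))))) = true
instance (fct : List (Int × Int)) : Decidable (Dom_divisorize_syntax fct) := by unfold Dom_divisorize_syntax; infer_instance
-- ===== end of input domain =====

-- B replaces A's back-popping recursion by an iterative front-to-back product build (objective: simpler).
-- Both Pythons empty the argument list in place; the equivalence proved here is about the return value.

-- ===== PORT A =====
-- A: pop the LAST factor, recurse on the rest, then append pre + suf for every pre, suf.
def divisorize_syntax (fct : List (Int × Int)) : List (List (Int × Int)) :=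
  match h : fct.getLast? with
  | none => [] ++ [[]]
  | some (b, e) =>
    let pre_div := divisorize_syntax fct.dropLast
    let suf_div := (PySem.List.pyRange 0 (e + 1) 1).map (fun k => [(b, k)])
    pre_div.foldl (fun div pre => suf_div.foldl (fun div suf => div ++ [pre ++ suf]) div) []
termination_by fct.length
decreasing_by
  cases fct with
  | nil => simp [List.getLast?] at h
  | cons x xs => simp [List.length_dropLast]

-- ===== PORT B =====
-- B: while fct: pop the FIRST factor; div = [d + [(b,k)] for d in div for k in range(e+1)]
def divisorize_syntax_alt (fct : List (Int × Int)) : List (List (Int × Int)) :=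
  divisorize_syntax_alt_go fct [[]]
where
  divisorize_syntax_alt_go : List (Int × Int) → List (List (Int × Int)) → List (List (Int × Int))
  | [], div => div
  | (b, e) :: rest, div =>
      divisorize_syntax_alt_go rest
        (div.flatMap (fun d => (PySem.List.pyRange 0 (e + 1) 1).map (fun k => d ++ [(b, k)])))

-- ===== PRECONDITION & SPEC =====
def Spec_divisorize_syntax (fct : List (Int × Int)) (out : List (List (Int × Int))) : Prop := out = divisorize_syntax_alt fct
instance (fct : List (Int × Int)) (out : List (List (Int × Int))) : Decidable (Spec_divisorize_syntax fct out) := by unfold Spec_divisorize_syntax; infer_instance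

-- ===== CLAIM (what is proved, stated in full; the proofs are below) =====
def Claim_equal_divisorize_syntax : Prop := ∀ (fct : List (Int × Int)), Dom_divisorize_syntax fct → Spec_divisorize_syntax fct (divisorize_syntax fct)

-- ===== LEMMAS AND PROOFS =====

-- the per-factor step both programs perform
def pvStep (b e : Int) (d : List (Int × Int)) : List (List (Int × Int)) :=
  (PySem.List.pyRange 0 (e + 1) 1).map (fun k => d ++ [(b, k)])

theorem divisorize_syntax_nil : divisorize_syntax [] = [[]] := by
  unfold divisorize_syntax; rfl

theorem foldl_inner (b e : Int) (l : List (List (Int × Int))) :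
    ∀ init : List (List (Int × Int)),
      l.foldl (fun div pre => ((PySem.List.pyRange 0 (e + 1) 1).map (fun k => [(b, k)])).foldl
        (fun div suf => div ++ [pre ++ suf]) div) init = init ++ l.flatMap (pvStep b e) := by
  induction l with
  | nil => intro init; simp
  | cons pre rest ih =>
    intro init
    rw [List.foldl_cons, PySem.List.foldl_append_singleton_eq_map, ih]
    simp only [List.flatMap_cons, pvStep, List.map_map, Function.comp_def, List.append_assoc]

theorem divisorize_syntax_concat (xs : List (Int × Int)) (b e : Int) :
    divisorize_syntax (xs ++ [(b, e)]) = (divisorize_syntax xs).flatMap (pvStep b e) := by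
  conv_lhs => rw [divisorize_syntax]
  have hlast : (xs ++ [(b, e)]).getLast? = some (b, e) := by simp
  rw [hlast]
  simp only [List.dropLast_concat]
  rw [foldl_inner]
  simp

theorem alt_go_concat (xs : List (Int × Int)) (b e : Int) :
    ∀ div, divisorize_syntax_alt.divisorize_syntax_alt_go (xs ++ [(b, e)]) div
      = (divisorize_syntax_alt.divisorize_syntax_alt_go xs div).flatMap (pvStep b e) := by
  induction xs with
  | nil =>
    intro div
    rfl
  | cons x rest ih =>
    intro div
    obtain ⟨c, f⟩ := x
    simp only [List.cons_append, divisorize_syntax_alt.divisorize_syntax_alt_go]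
    exact ih _

-- ===== VERDICT (by name: the statement is the Claim_ definition above) =====
theorem divisorize_syntax_spec : Claim_equal_divisorize_syntax := by
  intro fct hd
  clear hd
  unfold Spec_divisorize_syntax divisorize_syntax_alt
  induction fct using List.reverseRecOn with
  | nil => rw [divisorize_syntax_nil]; rfl
  | append_singleton xs x ih =>
    obtain ⟨b, e⟩ := x
    rw [divisorize_syntax_concat, alt_go_concat, ih]
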